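-- pv_equiv track=rewrite | github.com/spoonsite/SPOON | server/openstorefront/openstorefront-plugin/aerospaceimport/scripts/parse.py | list_columns
-- ===== SOURCE A (Python) =====
-- import math
--
-- def list_columns(obj, cols=3, columnwise=True, gap=4, numbers=True):
--     """
--     see https://stackoverflow.com/questions/1524126/how-to-print-a-list-more-nicely
--     Print the given list in evenly-spaced columns.
--
--     Parameters
--     ----------
--     obj : list
--         The list to be printed.
--     cols : int
--         The number of columns in which the list should be printed.
--     columnwise : bool, default=True
--         If True, the items in the list will be printed column-wise.
--         If False the items in the list will be printed row-wise.
--     gap : int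
--         The number of spaces that should separate the longest column
--         item/s from the next column. This is the effective spacing
--         between columns based on the maximum len() of the list items.
--     """
--
--     sobj = [str(item) for item in obj]
--     if numbers:
--         for i in range(len(sobj)):
--             sobj[i] = '{}) '.format(i) + sobj[i]
--
--     if cols > len(sobj): cols = len(sobj)
--     max_len = max([len(item) for item in sobj])
--     if columnwise: cols = int(math.ceil(float(len(sobj)) / float(cols)))
--     plist = [sobj[i: i+cols] for i in range(0, len(sobj), cols)]
--     if columnwise:
--         if not len(plist[-1]) == cols:
--             plist[-1].extend(['']*(len(sobj) - len(plist[-1])))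
--         plist = zip(*plist)
--     printer = '\n'.join([
--         ''.join([c.ljust(max_len + gap) for c in p])
--         for p in plist])
--     return printer
-- ===== SOURCE B (Python) =====
-- def list_columns(obj, cols=3, columnwise=True, gap=4, numbers=True):
--     """Same grid as the original, built by direct index arithmetic instead of
--     chunk-and-transpose (slicing into plist + zip)."""
--     sobj = [('{}) '.format(i) if numbers else '') + str(item) for i, item in enumerate(obj)]
--     n = len(sobj)
--     if cols > n:
--         cols = n
--     width = max(map(len, sobj)) + gap
--     if columnwise:
--         nrows = -(-n // cols)
--         ncols = -(-n // nrows)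
--         lines = [''.join((sobj[c * nrows + r] if c * nrows + r < n else '').ljust(width)
--                          for c in range(ncols))
--                  for r in range(nrows)]
--     else:
--         lines = [''.join(sobj[r * cols + c].ljust(width)
--                          for c in range(cols) if r * cols + c < n)
--                  for r in range(-(-n // cols))]
--     return '\n'.join(lines)
-- ===== Notes on version B (the rewrite author's own statement) =====
-- stated objective: alternative
-- what changed: B emits each output cell by direct index arithmetic (sobj[c*nrows+r] column-wise, sobj[r*cols+c] row-wise, missing cells as '') instead of A's slicing into chunks, padding the last chunk and transposing with zip(*plist).
import Mathlib
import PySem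

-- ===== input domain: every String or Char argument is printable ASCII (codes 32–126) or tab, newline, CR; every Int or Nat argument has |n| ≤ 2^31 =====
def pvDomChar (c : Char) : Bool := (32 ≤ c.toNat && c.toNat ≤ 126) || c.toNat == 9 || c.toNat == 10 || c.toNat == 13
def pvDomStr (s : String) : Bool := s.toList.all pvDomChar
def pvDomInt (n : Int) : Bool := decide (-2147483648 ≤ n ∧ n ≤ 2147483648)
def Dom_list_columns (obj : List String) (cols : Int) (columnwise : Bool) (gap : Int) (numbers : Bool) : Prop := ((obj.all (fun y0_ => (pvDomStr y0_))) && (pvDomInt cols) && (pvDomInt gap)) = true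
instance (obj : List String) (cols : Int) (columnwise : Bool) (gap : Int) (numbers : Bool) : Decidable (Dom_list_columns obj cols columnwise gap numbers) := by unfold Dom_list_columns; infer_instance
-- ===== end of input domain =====

-- B builds each output cell by direct index arithmetic instead of A's chunk-slice + pad + zip transpose; return values proved equal on Pre_.


-- ===== PORT A =====
-- str.ljust(w): pad on the right with spaces to width w (unchanged if already at least that wide)
def pyLjust (s : List Char) (w : Int) : List Char := s ++ List.replicate (w - (s.length : Int)).toNat ' '

-- zip(*rows): the transposed grid, truncated to the shortest row (Python's zip truncation)
def zipRows (l : List (List (List Char))) : List (List (List Char)) :=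
  (List.range ((l.map List.length).min?.getD 0)).map (fun r => l.map (fun row => row.getD r []))

-- sobj = [str(item) for item in obj]; then the in-place numbering loop 'sobj[i] = "{}) ".format(i) + sobj[i]'
def aSobj (obj : List String) (numbers : Bool) : List (List Char) :=
  let sobj0 : List (List Char) := obj.map (fun item => item.toList)
  if numbers then sobj0.mapIdx (fun i s => PySem.Int.toChars (i : Int) ++ [')', ' '] ++ s) else sobj0

-- everything after sobj is built
def aBody (sobj : List (List Char)) (cols : Int) (columnwise : Bool) (gap : Int) : String :=
  let n : Int := (sobj.length : Int)
  let cols1 : Int := if cols > n then n else cols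
  -- max([...]): 'none' is Python's ValueError on an empty list, excluded by Pre_
  let maxLen : Int := (PySem.List.max? (sobj.map (fun s => (s.length : Int))) (fun x => x)).getD 0
  -- int(math.ceil(float(n)/float(cols))): exact ceiling division at these magnitudes
  let cols2 : Int := if columnwise then -(PySem.Int.floordiv (-n) cols1) else cols1
  let plist : List (List (List Char)) :=
    (PySem.List.pyRange 0 n cols2).map (fun i => PySem.List.slice sobj (some i) (some (i + cols2)))
  let plist2 : List (List (List Char)) :=
    if columnwise then
      -- plist[-1].extend(['']*(len(sobj)-len(plist[-1]))) when the last chunk is short; then zip(*plist)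
      let last := PySem.List.pyGetD plist (-1) []
      zipRows (if ¬ ((last.length : Int) = cols2) then
                 plist.dropLast ++ [last ++ List.replicate ((n - (last.length : Int)).toNat) []]
               else plist)
    else plist
  String.ofList (PySem.Chars.join ['\n']
    (plist2.map (fun p => PySem.Chars.join [] (p.map (fun c => pyLjust c (maxLen + gap))))))

def list_columns (obj : List String) (cols : Int) (columnwise : Bool) (gap : Int) (numbers : Bool) : String :=
  aBody (aSobj obj numbers) cols columnwise gap

-- ===== PORT B =====
-- sobj built in one enumerate pass
def bSobj (obj : List String) (numbers : Bool) : List (List Char) :=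
  (PySem.List.enumerate obj 0).map
    (fun p => (if numbers then PySem.Int.toChars p.1 ++ [')', ' '] else []) ++ p.2.toList)

def bBody (sobj : List (List Char)) (cols : Int) (columnwise : Bool) (gap : Int) : String :=
  let n : Int := (sobj.length : Int)
  let cols1 : Int := if cols > n then n else cols
  -- max(map(len, sobj)): 'none' is Python's ValueError on an empty list, excluded by Pre_
  let width : Int := (PySem.List.max? (sobj.map (fun s => (s.length : Int))) (fun x => x)).getD 0 + gap
  let lines : List (List Char) :=
    if columnwise then
      let nrows : Int := -(PySem.Int.floordiv (-n) cols1)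
      let ncols : Int := -(PySem.Int.floordiv (-n) nrows)
      (PySem.List.pyRange 0 nrows 1).map (fun r =>
        PySem.Chars.join [] ((PySem.List.pyRange 0 ncols 1).map (fun c =>
          pyLjust (if c * nrows + r < n then PySem.List.pyGetD sobj (c * nrows + r) [] else []) width)))
    else
      (PySem.List.pyRange 0 (-(PySem.Int.floordiv (-n) cols1)) 1).map (fun r =>
        PySem.Chars.join []
          (((PySem.List.pyRange 0 cols1 1).filter (fun c => decide (r * cols1 + c < n))).map
            (fun c => pyLjust (PySem.List.pyGetD sobj (r * cols1 + c) []) width)))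
  String.ofList (PySem.Chars.join ['\n'] lines)

def list_columns_alt (obj : List String) (cols : Int) (columnwise : Bool) (gap : Int) (numbers : Bool) : String :=
  bBody (bSobj obj numbers) cols columnwise gap

-- ===== PRECONDITION & SPEC =====
-- Pre_ excludes exactly the inputs where A raises: empty obj (ValueError in max()), cols = 0
-- (ZeroDivisionError or ValueError), and columnwise with negative cols (IndexError on plist[-1]).
def Pre_list_columns (obj : List String) (cols : Int) (columnwise : Bool) (gap : Int) (numbers : Bool) : Prop :=
  obj ≠ [] ∧ cols ≠ 0 ∧ (columnwise = true → 1 ≤ cols)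
instance (obj : List String) (cols : Int) (columnwise : Bool) (gap : Int) (numbers : Bool) : Decidable (Pre_list_columns obj cols columnwise gap numbers) := by unfold Pre_list_columns; infer_instance

def pvWitness_list_columns : List String × Int × Bool × Int × Bool := (["alpha", "bb", "c", "dd", "e"], 2, true, 3, true)

def Spec_list_columns (obj : List String) (cols : Int) (columnwise : Bool) (gap : Int) (numbers : Bool) (out : String) : Prop := out = list_columns_alt obj cols columnwise gap numbers
instance (obj : List String) (cols : Int) (columnwise : Bool) (gap : Int) (numbers : Bool) (out : String) : Decidable (Spec_list_columns obj cols columnwise gap numbers out) := by unfold Spec_list_columns; infer_instance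

-- ===== CLAIM (what is proved, stated in full; the proofs are below) =====
def Claim_equal_list_columns : Prop := ∀ (obj : List String) (cols : Int) (columnwise : Bool) (gap : Int) (numbers : Bool), Dom_list_columns obj cols columnwise gap numbers → Pre_list_columns obj cols columnwise gap numbers → Spec_list_columns obj cols columnwise gap numbers (list_columns obj cols columnwise gap numbers)

-- ===== LEMMAS AND PROOFS =====

theorem sobj_eq (obj : List String) (numbers : Bool) : aSobj obj numbers = bSobj obj numbers := by
  unfold aSobj bSobj
  cases numbers with
  | false =>
    simp only [Bool.false_eq_true, if_false, List.nil_append]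
    rw [show (fun p : Int × String => p.2.toList) = (fun s : String => s.toList) ∘ (fun p : Int × String => p.2) from rfl,
        ← List.map_map, PySem.List.map_snd_enumerate]
  | true =>
    apply List.ext_getElem
    · simp [PySem.List.length_enumerate]
    · intro i h1 h2
      simp [List.getElem_mapIdx, PySem.List.getElem_enumerate]

theorem segment_eq_map' (xs : List (List Char)) (a k : Nat) :
    (xs.drop a).take k = (List.range (min k (xs.length - a))).map (fun c => xs.getD (a + c) []) := by
  apply List.ext_getElem
  · simp
  · intro i h1 h2
    simp only [List.getElem_take, List.getElem_drop, List.getElem_map, List.getElem_range]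
    rw [List.getD_eq_getElem?_getD, List.getElem?_eq_getElem (by simp at h1; omega)]
    simp
theorem range_filter_lt (m t a : Nat) :
    (List.range m).filter (fun c => decide (a + c < t)) = List.range (min m (t - a)) := by
  induction m with
  | zero => simp
  | succ m ih =>
    rw [List.range_succ, List.filter_append, ih]
    by_cases hm : a + m < t
    · have h1 : min (m+1) (t-a) = (min m (t-a)) + 1 := by omega
      rw [h1, List.range_succ]
      have h2 : min m (t - a) = m := by omega
      simp [hm, h2]
    · have h1 : min (m+1) (t-a) = min m (t-a) := by omega
      simp [h1, hm]
theorem ceil_natCast (a c : Nat) (hc : 0 < c) :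
    -(PySem.Int.floordiv (-(a : Int)) (c : Int)) = (((a + c - 1) / c : Nat) : Int) := by
  rw [PySem.Int.neg_floordiv_neg_eq_iff_of_pos (by exact_mod_cast hc)]
  set q := (a + c - 1) / c with hq
  set m := (a + c - 1) % c with hmdef
  have h := Nat.div_add_mod (a + c - 1) c
  have hm : m < c := Nat.mod_lt _ hc
  rw [← hq, ← hmdef] at h
  zify [show 1 ≤ a + c by omega] at h
  zify at hm
  exact ⟨by nlinarith [h, hm], by nlinarith [h, hm]⟩
theorem chunks_eq (xs : List (List Char)) (s : Nat) (hs : 0 < s) :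
    (PySem.List.pyRange 0 (xs.length : Int) (s : Int)).map
        (fun i => PySem.List.slice xs (some i) (some (i + (s : Int))))
      = (List.range ((xs.length + s - 1) / s)).map (fun c => (xs.drop (c * s)).take s) := by
  rw [PySem.List.pyRange_of_pos 0 (xs.length : Int) (by exact_mod_cast hs)]
  have hcnt : (if (0:Int) < (xs.length : Int) then (((xs.length : Int) - 0 + s - 1) / s).toNat else 0)
      = (xs.length + s - 1) / s := by
    rcases Nat.eq_zero_or_pos xs.length with h | h
    · simp [h]
      exact (Nat.div_eq_of_lt (by omega)).symm
    · rw [if_pos (by exact_mod_cast h)]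
      have : ((xs.length : Int) - 0 + s - 1) = ((xs.length + s - 1 : Nat) : Int) := by omega
      rw [this, ← Int.natCast_div, Int.toNat_natCast]
  rw [hcnt, List.map_map]
  apply List.map_congr_left
  intro k hk
  simp only [Function.comp]
  have h1 : (0 : Int) + (s : Int) * (k : Int) = ((k * s : Nat) : Int) := by push_cast; ring
  rw [h1, PySem.List.slice_natCast_add]

-- row-wise branch: chunks rendered one per line  =  per-row index arithmetic
theorem rowwise_lines (xs : List (List Char)) (C : Nat) (hC : 0 < C) (W : Int) :
    ((PySem.List.pyRange 0 (xs.length : Int) (C : Int)).map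
        (fun i => PySem.List.slice xs (some i) (some (i + (C : Int))))).map
      (fun p => PySem.Chars.join [] (p.map (fun c => pyLjust c W)))
  = (PySem.List.pyRange 0 (-(PySem.Int.floordiv (-(xs.length : Int)) (C : Int))) 1).map
      (fun r => PySem.Chars.join []
        (((PySem.List.pyRange 0 (C : Int) 1).filter (fun c => decide (r * (C : Int) + c < (xs.length : Int)))).map
          (fun c => pyLjust (PySem.List.pyGetD xs (r * (C : Int) + c) []) W))) := by
  rw [chunks_eq xs C hC, ceil_natCast xs.length C hC, List.map_map,
      PySem.List.pyRange_one, PySem.List.pyRange_one]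
  simp only [Int.sub_zero, Int.toNat_natCast, List.map_map]
  apply List.map_congr_left
  intro r hr
  rw [List.mem_range] at hr
  simp only [Function.comp, zero_add]
  congr 1
  rw [segment_eq_map', List.filter_map]
  have hfc : ((List.range C).filter ((fun c => decide (↑r * (C : Int) + c < (xs.length : Int))) ∘ (fun k : Nat => (k : Int))))
      = (List.range C).filter (fun c => decide (r * C + c < xs.length)) := by
    apply List.filter_congr
    intro c _
    simp only [Function.comp]
    congr 1
    exact propext ⟨fun h => by exact_mod_cast h, fun h => by exact_mod_cast h⟩
  rw [hfc, range_filter_lt, List.map_map, List.map_map]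
  apply List.map_congr_left
  intro c hc2
  rw [List.mem_range] at hc2
  simp only [Function.comp]
  have h1 : (r : Int) * (C : Int) + (c : Int) = ((r * C + c : Nat) : Int) := by push_cast; ring
  rw [h1, PySem.List.pyGetD_natCast]
theorem min?_getD_eq (l : List Nat) (K : Nat) (h1 : K ∈ l) (h2 : ∀ x ∈ l, K ≤ x) :
    l.min?.getD 0 = K := by
  rw [(List.min?_eq_some_iff).mpr ⟨h1, h2⟩]; rfl

theorem seg_getD (xs : List (List Char)) (a k r : Nat) (h : r < min k (xs.length - a)) :
    ((xs.drop a).take k).getD r [] = xs.getD (a + r) [] := by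
  rw [segment_eq_map', List.getD_eq_getElem?_getD, List.getElem?_map, List.getElem?_range h]
  rfl

-- column-wise branch: chunk, pad the last chunk, transpose with zip  =  per-cell index arithmetic
theorem colwise_lines (xs : List (List Char)) (K : Nat) (hK : 0 < K) (hKn : K ≤ xs.length)
    (hn : 0 < xs.length) (W : Int) :
    (zipRows
        (if ¬ (((PySem.List.pyGetD ((PySem.List.pyRange 0 (xs.length : Int) (K : Int)).map
                  (fun i => PySem.List.slice xs (some i) (some (i + (K : Int))))) (-1) []).length : Int) = (K : Int)) then
           ((PySem.List.pyRange 0 (xs.length : Int) (K : Int)).map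
              (fun i => PySem.List.slice xs (some i) (some (i + (K : Int))))).dropLast ++
             [PySem.List.pyGetD ((PySem.List.pyRange 0 (xs.length : Int) (K : Int)).map
                  (fun i => PySem.List.slice xs (some i) (some (i + (K : Int))))) (-1) [] ++
               List.replicate (((xs.length : Int) - ((PySem.List.pyGetD ((PySem.List.pyRange 0 (xs.length : Int) (K : Int)).map
                  (fun i => PySem.List.slice xs (some i) (some (i + (K : Int))))) (-1) []).length : Int)).toNat) []]
         else
           (PySem.List.pyRange 0 (xs.length : Int) (K : Int)).map
              (fun i => PySem.List.slice xs (some i) (some (i + (K : Int)))))).map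
      (fun p => PySem.Chars.join [] (p.map (fun c => pyLjust c W)))
  = (PySem.List.pyRange 0 (K : Int) 1).map
      (fun r => PySem.Chars.join []
        ((PySem.List.pyRange 0 (-(PySem.Int.floordiv (-(xs.length : Int)) (K : Int))) 1).map
          (fun c => pyLjust (if c * (K : Int) + r < (xs.length : Int)
                             then PySem.List.pyGetD xs (c * (K : Int) + r) [] else []) W))) := by
  have hchunks := chunks_eq xs K hK
  set n := xs.length with hn'
  rw [hchunks, ceil_natCast n K hK]
  set M := (n + K - 1) / K with hM
  set f : Nat → List (List Char) := fun c => (xs.drop (c * K)).take K with hf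
  -- arithmetic facts about M and the last-chunk length L
  have hdm := Nat.div_add_mod (n + K - 1) K
  have hmod : (n + K - 1) % K < K := Nat.mod_lt _ hK
  rw [← hM, Nat.mul_comm K M] at hdm
  have hM1 : 1 ≤ M := by rw [hM, Nat.le_div_iff_mul_le hK]; omega
  have h1 : (M - 1) * K + K = M * K := by
    have h2 : M - 1 + 1 = M := by omega
    calc (M - 1) * K + K = ((M - 1) + 1) * K := by ring
      _ = M * K := by rw [h2]
  have hMn : n ≤ M * K := by omega
  have hMl : (M - 1) * K < n := by omega
  set L := n - (M - 1) * K with hL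
  have hL1 : 1 ≤ L := by omega
  have hLK : L ≤ K := by omega
  -- last chunk
  have hsplit : (List.range M).map f = (List.range (M - 1)).map f ++ [f (M - 1)] := by
    conv_lhs => rw [show M = (M - 1) + 1 by omega, List.range_succ, List.map_append]
    rfl
  have hlast : PySem.List.pyGetD ((List.range M).map f) (-1) [] = f (M - 1) := by
    rw [hsplit]; exact PySem.List.pyGetD_neg_one_append_singleton _ _ _
  have hlastlen : (f (M - 1)).length = L := by
    simp only [hf, List.length_take, List.length_drop]; omega
  have hflen : ∀ c, c < M - 1 → (f c).length = K := by
    intro c hc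
    simp only [hf, List.length_take, List.length_drop]
    have hcm : c * K + K ≤ (M - 1) * K := by
      calc c * K + K = (c + 1) * K := by ring
        _ ≤ (M - 1) * K := Nat.mul_le_mul_right _ (by omega)
    omega
  have hcKr : ∀ c r, c < M - 1 → r < K → c * K + r < n := by
    intro c r hc hr
    have hcm : c * K + K ≤ (M - 1) * K := by
      calc c * K + K = (c + 1) * K := by ring
        _ ≤ (M - 1) * K := Nat.mul_le_mul_right _ (by omega)
    omega
  have hsegD : ∀ c r, c * K + r < n → r < K → (f c).getD r [] = xs.getD (c * K + r) [] := by
    intro c r hlt hr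
    exact seg_getD xs (c * K) K r (by omega)
  rw [hlast, hlastlen]
  -- reduce the right-hand side to a map over Nat ranges
  simp only [PySem.List.pyRange_one, Int.sub_zero, Int.toNat_natCast, List.map_map]
  -- per-case: compute the zipRows argument and its row count, then compare row by row
  by_cases hLKeq : L = K
  · -- the last chunk is full: no padding
    rw [if_neg (by simp [hLKeq])]
    have hminK : ((((List.range M).map f).map List.length).min?.getD 0) = K := by
      apply min?_getD_eq
      · refine List.mem_map.mpr ⟨f 0, List.mem_map.mpr ⟨0, List.mem_range.mpr (by omega), rfl⟩, ?_⟩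
        simp only [hf, List.length_take, List.length_drop]; omega
      · intro x hx
        obtain ⟨y, hy, rfl⟩ := List.mem_map.mp hx
        obtain ⟨c, hc, rfl⟩ := List.mem_map.mp hy
        rw [List.mem_range] at hc
        simp only [hf, List.length_take, List.length_drop]
        have hcm : c * K ≤ (M - 1) * K := Nat.mul_le_mul_right _ (by omega)
        omega
    unfold zipRows
    rw [hminK, List.map_map]
    apply List.map_congr_left
    intro r hr
    rw [List.mem_range] at hr
    simp only [Function.comp, zero_add]
    congr 1
    rw [List.map_map, List.map_map]
    apply List.map_congr_left
    intro c hc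
    rw [List.mem_range] at hc
    simp only [Function.comp]
    have hidx : c * K + r < n := by
      have hcm : c * K + K ≤ M * K := by
        calc c * K + K = (c + 1) * K := by ring
          _ ≤ M * K := Nat.mul_le_mul_right _ (by omega)
      omega
    have hcast : (c : Int) * (K : Int) + (r : Int) = ((c * K + r : Nat) : Int) := by push_cast; ring
    rw [hsegD c r hidx hr, hcast, if_pos (by exact_mod_cast hidx), PySem.List.pyGetD_natCast]
  · -- short last chunk: padded with '' then truncated back by zip
    rw [if_pos (by exact_mod_cast hLKeq)]
    have hM2 : 2 ≤ M := by
      rcases Nat.lt_or_ge M 2 with h | h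
      · exfalso
        have hM1' : M = 1 := by omega
        have h0 : (M - 1) * K = 0 := by rw [hM1']; simp
        exact hLKeq (by omega)
      · exact h
    have htn : (((n : Int) - (L : Int)).toNat) = n - L := by omega
    rw [hsplit, List.dropLast_concat, htn]
    set newlast : List (List Char) := f (M - 1) ++ List.replicate (n - L) [] with hnl
    have hnllen : newlast.length = n := by
      simp only [hnl, List.length_append, List.length_replicate, hlastlen]; omega
    have hminK : (((((List.range (M - 1)).map f) ++ [newlast]).map List.length).min?.getD 0) = K := by
      apply min?_getD_eq
      · refine List.mem_map.mpr ⟨f 0, List.mem_append_left _ (List.mem_map.mpr ⟨0, List.mem_range.mpr (by omega), rfl⟩), ?_⟩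
        simp only [hf, List.length_take, List.length_drop]; omega
      · intro x hx
        obtain ⟨y, hy, rfl⟩ := List.mem_map.mp hx
        rcases List.mem_append.mp hy with hy | hy
        · obtain ⟨c, hc, rfl⟩ := List.mem_map.mp hy
          rw [List.mem_range] at hc
          rw [hflen c hc]
        · rw [List.mem_singleton.mp hy, hnllen]; omega
    unfold zipRows
    rw [hminK, List.map_map]
    apply List.map_congr_left
    intro r hr
    rw [List.mem_range] at hr
    simp only [Function.comp, zero_add]
    congr 1
    -- split the right-hand row at its last cell
    conv_rhs => rw [show M = (M - 1) + 1 by omega, List.range_succ, List.map_append]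
    simp only [List.map_append, List.map_map, List.map_singleton]
    congr 1
    · apply List.map_congr_left
      intro c hc
      rw [List.mem_range] at hc
      simp only [Function.comp]
      have hidx : c * K + r < n := hcKr c r hc hr
      have hcast : (c : Int) * (K : Int) + (r : Int) = ((c * K + r : Nat) : Int) := by push_cast; ring
      rw [hsegD c r hidx hr, hcast, if_pos (by exact_mod_cast hidx), PySem.List.pyGetD_natCast]
    · simp only [Function.comp]
      congr 1
      by_cases hrL : r < L
      · have hidx : (M - 1) * K + r < n := by omega
        have hcast : ((M - 1 : Nat) : Int) * (K : Int) + (r : Int) = (((M - 1) * K + r : Nat) : Int) := by push_cast; ring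
        rw [List.getD_append _ _ _ _ (by rw [hlastlen]; omega), hsegD (M - 1) r hidx hr, hcast,
            if_pos (by exact_mod_cast hidx), PySem.List.pyGetD_natCast]
      · have hidx : ¬ ((M - 1) * K + r < n) := by omega
        have hcast : ((M - 1 : Nat) : Int) * (K : Int) + (r : Int) = (((M - 1) * K + r : Nat) : Int) := by push_cast; ring
        rw [List.getD_append_right _ _ _ _ (by rw [hlastlen]; omega), hcast,
            if_neg (by exact_mod_cast hidx)]
        simp [hlastlen]

theorem body_eq (xs : List (List Char)) (cols : Int) (cw : Bool) (gap : Int)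
    (hx : xs ≠ []) (hc : 1 ≤ cols) :
    aBody xs cols cw gap = bBody xs cols cw gap := by
  have hn1 : 0 < xs.length := List.length_pos_iff.mpr hx
  obtain ⟨C, hC1, hCn, hCeq⟩ :
      ∃ C : Nat, 0 < C ∧ C ≤ xs.length ∧
        (if cols > (xs.length : Int) then (xs.length : Int) else cols) = (C : Int) := by
    refine ⟨(if cols > (xs.length : Int) then (xs.length : Int) else cols).toNat, ?_, ?_, ?_⟩ <;>
      split_ifs with h <;> omega
  simp only [aBody, bBody, hCeq]
  set W : Int := (PySem.List.max? (xs.map (fun s => (s.length : Int))) (fun x => x)).getD 0 + gap with hW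
  cases cw with
  | false =>
    simp only [Bool.false_eq_true, if_false]
    congr 1
    congr 1
    exact rowwise_lines xs C hC1 W
  | true =>
    simp only [if_true]
    rw [ceil_natCast xs.length C hC1]
    have hK : 0 < (xs.length + C - 1) / C := Nat.div_pos (by omega) hC1
    have hKn : (xs.length + C - 1) / C ≤ xs.length := by
      have hmul : xs.length + C - 1 ≤ xs.length * C := by
        have h1 : (1 : Int) ≤ (C : Int) := by exact_mod_cast hC1
        have h2 : (1 : Int) ≤ (xs.length : Int) := by exact_mod_cast hn1
        zify [show 1 ≤ xs.length + C by omega]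
        nlinarith [h1, h2]
      calc (xs.length + C - 1) / C ≤ xs.length * C / C := Nat.div_le_div_right hmul
        _ = xs.length := Nat.mul_div_cancel _ hC1
    congr 1
    congr 1
    exact colwise_lines xs ((xs.length + C - 1) / C) hK hKn hn1 W

-- Python's range(0, n, s) is empty for n > 0 and a negative step s (no PySem lemma covers a
-- negative non-unit step, so this unfolds the definition)
theorem pyRange_nil_of_neg (n s : Int) (hn : 0 < n) (hs : s < 0) :
    PySem.List.pyRange 0 n s = [] := by
  unfold PySem.List.pyRange
  rw [if_neg (by omega)]
  have h1 : ¬ (0 < s) := by omega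
  have h2 : ¬ (n < 0) := by omega
  simp [h1, h2]

-- row-wise with negative cols: both sides produce no rows at all, hence the empty string
theorem body_eq_neg (xs : List (List Char)) (cols gap : Int) (hx : xs ≠ []) (hneg : cols < 0) :
    aBody xs cols false gap = bBody xs cols false gap := by
  have hn1 : 0 < xs.length := List.length_pos_iff.mpr hx
  simp only [aBody, bBody, Bool.false_eq_true, if_false]
  rw [if_neg (show ¬ cols > (xs.length : Int) by omega)]
  have hfd : 0 ≤ PySem.Int.floordiv (-(xs.length : Int)) cols := by
    rw [show cols = -(-cols) by ring, PySem.Int.floordiv_neg_neg,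
        PySem.Int.floordiv_eq_ediv_of_pos (by omega)]
    exact Int.ediv_nonneg (by omega) (by omega)
  rw [pyRange_nil_of_neg _ _ (by exact_mod_cast hn1) hneg,
      PySem.List.pyRange_one_eq_nil (by omega), PySem.List.pyRange_one_eq_nil (by omega)]
  rfl

-- ===== VERDICT (by name: the statement is the Claim_ definition above) =====
theorem list_columns_spec : Claim_equal_list_columns := by
  intro obj cols cw gap numbers _ hpre
  obtain ⟨hne, hc0, hcw⟩ := hpre
  unfold Spec_list_columns list_columns list_columns_alt
  rw [sobj_eq]
  have hxne : bSobj obj numbers ≠ [] := by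
    cases obj with
    | nil => exact absurd rfl hne
    | cons a l => simp [bSobj, PySem.List.enumerate_cons]
  by_cases hc : 1 ≤ cols
  · exact body_eq _ cols cw gap hxne hc
  · cases cw with
    | true => exact absurd (hcw rfl) hc
    | false => exact body_eq_neg _ cols gap hxne (by omega)
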